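-- pv_equiv track=rewrite | github.com/pankajavasthi/Iprompto_Sentiment | ProcessEngine_Pankaj.py | PERSON_tag
-- ===== SOURCE A (Python) =====
-- from itertools import groupby
--
-- def PERSON_tag(line):
--     cwrd = "Tag: "
--     for tag, chunk in groupby(line, lambda x:x[1]):
--         if tag == "PERSON":
--             if cwrd == "Tag: ":
--                 cwrd=" ".join(w for w, t in chunk)
--             else:
--                 cwrd=cwrd, " ".join(w for w, t in chunk)
--     return cwrd
-- ===== SOURCE B (Python) =====
-- def PERSON_tag(line):
--     # pass 1: group maximal consecutive same-tag runs, collecting PERSON run strings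
--     persons = []
--     cur_tag = None
--     cur_words = None
--     for w, t in line:
--         if cur_words is not None and t == cur_tag:
--             cur_words.append(w)
--         else:
--             if cur_words is not None and cur_tag == "PERSON":
--                 persons.append(" ".join(cur_words))
--             cur_tag = t
--             cur_words = [w]
--     if cur_words is not None and cur_tag == "PERSON":
--         persons.append(" ".join(cur_words))
--     # pass 2
--     if not persons:
--         return "Tag: "
--     return " ".join(persons)
-- ===== Notes on version B (the rewrite author's own statement) =====
-- stated objective: alternative
-- what changed: B separates grouping from output-building: a single pass collects the joined string of every maximal PERSON-tagged run into a list, and a second step turns that list into the result, instead of A's groupby with the in-loop sentinel-string/tuple accumulator.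
-- outside the precondition, e.g. on PERSON_tag([('A', 'PERSON'), ('x', 'O'), ('B', 'PERSON')]): A returns ('A', 'B'), B returns 'A B'
import Mathlib
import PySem

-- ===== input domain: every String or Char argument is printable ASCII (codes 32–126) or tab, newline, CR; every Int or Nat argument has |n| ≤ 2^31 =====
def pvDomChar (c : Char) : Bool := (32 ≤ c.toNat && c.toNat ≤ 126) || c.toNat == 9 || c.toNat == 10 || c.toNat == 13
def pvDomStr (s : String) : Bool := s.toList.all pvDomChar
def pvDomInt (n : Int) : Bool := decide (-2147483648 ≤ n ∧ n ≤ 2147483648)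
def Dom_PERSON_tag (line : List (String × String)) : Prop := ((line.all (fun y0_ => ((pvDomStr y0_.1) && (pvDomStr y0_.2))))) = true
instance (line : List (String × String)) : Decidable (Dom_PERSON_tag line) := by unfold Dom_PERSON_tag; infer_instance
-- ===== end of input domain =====

-- B separates grouping from output-building (PERSON-run strings collected in one pass, then turned
-- into the result), instead of A's groupby loop with an in-loop sentinel-string accumulator.


-- ===== PORT A =====
-- itertools.groupby(line, lambda x: x[1]) ported by hand, exact: the list of (key, chunk) for the
-- maximal runs of consecutive elements with equal key x.2, in order.
def pvGroupGo (t : String) (acc : List (String × String)) :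
    List (String × String) → List (String × List (String × String))
  | [] => [(t, acc)]
  | x :: xs => if x.2 == t then pvGroupGo t (acc ++ [x]) xs else (t, acc) :: pvGroupGo x.2 [x] xs

def pvGroupby : List (String × String) → List (String × List (String × String))
  | [] => []
  | x :: xs => pvGroupGo x.2 [x] xs

def PERSON_tag (line : List (String × String)) : String :=
  List.foldl (fun cwrd g =>
    if g.1 == "PERSON" then
      if cwrd == "Tag: " then PySem.Str.join " " (g.2.map Prod.fst)
      else cwrd
      -- in the else-branch Python builds the TUPLE (cwrd, " ".join(...)), leaving type str;
      -- those inputs are excluded by Pre_PERSON_tag, so the value kept here is never claimed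
    else cwrd) "Tag: " (pvGroupby line)

-- ===== PORT B =====
def PERSON_tag_alt (line : List (String × String)) : String :=
  let st := List.foldl (fun (st : List String × Option (String × List String)) x =>
    match st.2 with
    | some (ct, cws) =>
      if x.2 == ct then (st.1, some (ct, cws ++ [x.1]))
      else ((if ct == "PERSON" then st.1 ++ [PySem.Str.join " " cws] else st.1), some (x.2, [x.1]))
    | none => (st.1, some (x.2, [x.1]))) ([], none) line
  let persons : List String :=
    match st.2 with
    | some (ct, cws) => if ct == "PERSON" then st.1 ++ [PySem.Str.join " " cws] else st.1
    | none => st.1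
  if persons == [] then "Tag: " else PySem.Str.join " " persons

-- ===== PRECONDITION & SPEC =====
-- number of maximal runs of consecutive PERSON-tagged tokens (counted at the index ending each run)
def pvPersonRunEnds : List (String × String) → Nat
  | [] => 0
  | [x] => if x.2 == "PERSON" then 1 else 0
  | x :: y :: xs => (if x.2 == "PERSON" && !(y.2 == "PERSON") then 1 else 0) + pvPersonRunEnds (y :: xs)

-- Pre_ excludes lines with two or more maximal PERSON-tagged runs: there Python A returns a nested
-- tuple (not a str) — or, when an earlier run's words happen to join to the sentinel "Tag: ", an
-- accidental string produced by A's sentinel comparison.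
def Pre_PERSON_tag (line : List (String × String)) : Prop := pvPersonRunEnds line ≤ 1
instance (line : List (String × String)) : Decidable (Pre_PERSON_tag line) := by
  unfold Pre_PERSON_tag; infer_instance

def pvWitness_PERSON_tag : (List (String × String)) := [("Alice", "PERSON"), ("runs", "O")]

def Spec_PERSON_tag (line : List (String × String)) (out : String) : Prop := out = PERSON_tag_alt line
instance (line : List (String × String)) (out : String) : Decidable (Spec_PERSON_tag line out) := by
  unfold Spec_PERSON_tag; infer_instance

-- ===== CLAIM (what is proved, stated in full; the proofs are below) =====
def Claim_equal_PERSON_tag : Prop := ∀ (line : List (String × String)), Dom_PERSON_tag line → Pre_PERSON_tag line → Spec_PERSON_tag line (PERSON_tag line)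

-- ===== LEMMAS AND PROOFS =====

-- the joined strings of the maximal PERSON runs of `cur (as tag × collected words) continued by xs`
def pvRunsP : Option (String × List String) → List (String × String) → List String
  | some (t, ws), [] => if t == "PERSON" then [PySem.Str.join " " ws] else []
  | none, [] => []
  | some (t, ws), x :: xs =>
      if x.2 == t then pvRunsP (some (t, ws ++ [x.1])) xs
      else (if t == "PERSON" then [PySem.Str.join " " ws] else []) ++ pvRunsP (some (x.2, [x.1])) xs
  | none, x :: xs => pvRunsP (some (x.2, [x.1])) xs

-- A's fold over the groups equals folding the sentinel-pick over the PERSON-run strings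
theorem pvA_fold (xs : List (String × String)) :
    ∀ (t : String) (acc : List (String × String)) (c : String),
    List.foldl (fun cwrd g =>
      if g.1 == "PERSON" then
        if cwrd == "Tag: " then PySem.Str.join " " (g.2.map Prod.fst) else cwrd
      else cwrd) c (pvGroupGo t acc xs)
    = List.foldl (fun c s => if c == "Tag: " then s else c) c
        (pvRunsP (some (t, acc.map Prod.fst)) xs) := by
  induction xs with
  | nil =>
    intro t acc c
    simp only [pvGroupGo, pvRunsP, List.foldl]
    by_cases h1 : t = "PERSON" <;> by_cases h2 : c = "Tag: " <;>
      simp [h1, h2, List.foldl]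
  | cons x xs ih =>
    intro t acc c
    simp only [pvGroupGo, pvRunsP]
    by_cases h : x.2 = t
    · simpa [h, List.map_append] using ih t (acc ++ [x]) c
    · rw [if_neg (by simpa using h), if_neg (by simpa using h)]
      simp only [List.foldl_cons, List.foldl_append]
      rw [ih x.2 [x]]
      by_cases h1 : t = "PERSON" <;> by_cases h2 : c = "Tag: " <;>
        simp [h1, h2, List.foldl]

-- B's fold, closed off, produces exactly the PERSON-run strings
theorem pvB_fold (xs : List (String × String)) :
    ∀ (persons : List String) (cur : Option (String × List String)),
    (match (List.foldl (fun (st : List String × Option (String × List String)) x =>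
        match st.2 with
        | some (ct, cws) =>
          if x.2 == ct then (st.1, some (ct, cws ++ [x.1]))
          else ((if ct == "PERSON" then st.1 ++ [PySem.Str.join " " cws] else st.1), some (x.2, [x.1]))
        | none => (st.1, some (x.2, [x.1]))) (persons, cur) xs) with
      | (p, some (ct, cws)) => if ct == "PERSON" then p ++ [PySem.Str.join " " cws] else p
      | (p, none) => p)
    = persons ++ pvRunsP cur xs := by
  induction xs with
  | nil =>
    intro persons cur
    match cur with
    | none => simp [pvRunsP, List.foldl]
    | some (t, ws) =>
      simp only [pvRunsP, List.foldl]
      by_cases h1 : t = "PERSON" <;> simp [h1]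
  | cons x xs ih =>
    intro persons cur
    match cur with
    | none =>
      simp only [List.foldl_cons]
      exact ih persons (some (x.2, [x.1]))
    | some (t, ws) =>
      by_cases h : x.2 = t
      · simpa [pvRunsP, h] using ih persons (some (t, ws ++ [x.1]))
      · by_cases h1 : t = "PERSON"
        · subst h1
          simpa [pvRunsP, h, List.append_assoc] using
            ih (persons ++ [PySem.Str.join " " ws]) (some (x.2, [x.1]))
        · simpa [pvRunsP, h, h1] using ih persons (some (x.2, [x.1]))

theorem pvPersonRunEnds_head_tag (x : String × String) (xs : List (String × String)) :
    pvPersonRunEnds (("", x.2) :: xs) = pvPersonRunEnds (x :: xs) := by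
  cases xs <;> rfl

theorem pvJoin_single (s : String) : PySem.Str.join " " [s] = s := by
  simp [PySem.Str.join]

-- the number of PERSON-run strings equals the run count Pre_ bounds
theorem pvRunsP_length (xs : List (String × String)) :
    ∀ (t : String) (ws : List String),
    (pvRunsP (some (t, ws)) xs).length = pvPersonRunEnds (("", t) :: xs) := by
  induction xs with
  | nil =>
    intro t ws
    simp only [pvRunsP, pvPersonRunEnds]
    by_cases h1 : t = "PERSON" <;> simp [h1]
  | cons x xs ih =>
    intro t ws
    simp only [pvRunsP, pvPersonRunEnds]
    by_cases h : x.2 = t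
    · subst h
      simp [ih, pvPersonRunEnds_head_tag]
    · rw [if_neg (by simpa using h), List.length_append, ih x.2 [x.1],
        pvPersonRunEnds_head_tag x xs]
      by_cases h1 : t = "PERSON" <;> by_cases h2 : x.2 = "PERSON" <;>
        simp_all

theorem pvRunsP_none_length (line : List (String × String)) :
    (pvRunsP none line).length = pvPersonRunEnds line := by
  cases line with
  | nil => rfl
  | cons x xs =>
    show (pvRunsP (some (x.2, [x.1])) xs).length = _
    rw [pvRunsP_length, pvPersonRunEnds_head_tag]

theorem pvA_char (line : List (String × String)) :
    PERSON_tag line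
      = List.foldl (fun c s => if c == "Tag: " then s else c) "Tag: " (pvRunsP none line) := by
  cases line with
  | nil => rfl
  | cons x xs =>
    show List.foldl _ "Tag: " (pvGroupGo x.2 [x] xs) = _
    rw [pvA_fold xs x.2 [x] "Tag: "]
    rfl

theorem pvB_char (line : List (String × String)) :
    PERSON_tag_alt line
      = (if pvRunsP none line == [] then "Tag: " else PySem.Str.join " " (pvRunsP none line)) := by
  have h := pvB_fold line [] none
  simp only [List.nil_append] at h
  simp only [PERSON_tag_alt]
  generalize hE : List.foldl (fun (st : List String × Option (String × List String)) x =>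
    match st.2 with
    | some (ct, cws) =>
      if x.2 == ct then (st.1, some (ct, cws ++ [x.1]))
      else ((if ct == "PERSON" then st.1 ++ [PySem.Str.join " " cws] else st.1), some (x.2, [x.1]))
    | none => (st.1, some (x.2, [x.1]))) ([], none) line = st
  rw [hE] at h
  obtain ⟨p, c⟩ := st
  cases c with
  | none =>
    simp only at h ⊢
    rw [h]
  | some tc =>
    obtain ⟨ct, cws⟩ := tc
    simp only at h ⊢
    rw [h]

-- ===== VERDICT (by name: the statement is the Claim_ definition above) =====
theorem PERSON_tag_spec : Claim_equal_PERSON_tag := by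
  intro line _ hpre
  unfold Spec_PERSON_tag
  rw [pvA_char, pvB_char]
  have hlen : (pvRunsP none line).length ≤ 1 := by
    rw [pvRunsP_none_length]; exact hpre
  match h : pvRunsP none line with
  | [] => rfl
  | [s] => simp [List.foldl, pvJoin_single]
  | s :: t :: rest => rw [h] at hlen; simp at hlen
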